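-- pv_equiv track=rewrite | github.com/nec-research/agentquest | legacy/agentquest/benchmarks/cypher/cypher_driver.py | verify_substitution
-- ===== SOURCE A (Python) =====
-- def verify_substitution(string1, string2, original_char, substituted_char):
--     # Check if the lengths of the two strings are the same
--     if len(string1) != len(string2):
--         return False
--
--     # Verify that each specified character is substituted correctly
--     for i in range(len(string1)):
--         if string1[i] == original_char:
--             if string2[i] != substituted_char:
--                 return False
--         else:
--             if string1[i] != string2[i]:
--                 return False
--
--     return True
-- ===== SOURCE B (Python) =====
-- def verify_substitution(string1, string2, original_char, substituted_char):
--     if len(string1) != len(string2):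
--         return False
--     expected = ''.join(substituted_char if c == original_char else c for c in string1)
--     return expected == string2
-- ===== Notes on version B (the rewrite author's own statement) =====
-- stated objective: simpler
-- what changed: Replaces the per-index interleaved short-circuit checks with a build-then-compare decomposition: construct the expected translated string from string1 in one pass and compare it to string2 with a single equality.
import Mathlib
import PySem

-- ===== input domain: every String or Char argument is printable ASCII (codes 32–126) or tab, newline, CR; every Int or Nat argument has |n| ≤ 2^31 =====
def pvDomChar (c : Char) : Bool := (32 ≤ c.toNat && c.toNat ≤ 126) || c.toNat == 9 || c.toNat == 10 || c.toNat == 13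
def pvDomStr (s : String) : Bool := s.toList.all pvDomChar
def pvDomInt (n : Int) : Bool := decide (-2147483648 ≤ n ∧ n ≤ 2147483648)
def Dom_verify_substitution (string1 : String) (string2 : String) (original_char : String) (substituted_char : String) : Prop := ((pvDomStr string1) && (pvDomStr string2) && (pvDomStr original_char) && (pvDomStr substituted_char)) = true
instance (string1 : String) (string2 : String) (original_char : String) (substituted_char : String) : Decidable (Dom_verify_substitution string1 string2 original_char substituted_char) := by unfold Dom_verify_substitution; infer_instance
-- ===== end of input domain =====

-- B replaces A's per-index interleaved checks by build-the-expected-string-then-compare (objective: simpler).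

-- ===== PORT A =====
-- A's index loop over two equal-length strings, transcribed as a simultaneous walk
-- of the two character lists (exact: the guard guarantees equal lengths).
-- `string1[i] == original_char` compares a one-character string with original_char.
def verifyLoopA : List Char → List Char → String → String → Bool
  | [], _, _, _ => true
  | _ :: _, [], _, _ => true   -- unreachable under the length guard
  | c :: cs, d :: ds, oc, sc =>
    if String.ofList [c] = oc then
      if String.ofList [d] ≠ sc then false else verifyLoopA cs ds oc sc
    else
      if c ≠ d then false else verifyLoopA cs ds oc sc

def verify_substitution (string1 : String) (string2 : String) (original_char : String) (substituted_char : String) : Bool :=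
  if PySem.Str.len string1 ≠ PySem.Str.len string2 then false
  else verifyLoopA string1.toList string2.toList original_char substituted_char

-- ===== PORT B =====
-- ''.join(substituted_char if c == original_char else c for c in string1) == string2
def verify_substitution_alt (string1 : String) (string2 : String) (original_char : String) (substituted_char : String) : Bool :=
  if PySem.Str.len string1 ≠ PySem.Str.len string2 then false
  else
    (string1.toList.flatMap (fun c =>
        if String.ofList [c] = original_char then substituted_char.toList else [c]))
      == string2.toList

-- ===== PRECONDITION & SPEC =====
def Spec_verify_substitution (string1 : String) (string2 : String) (original_char : String) (substituted_char : String) (out : Bool) : Prop := out = verify_substitution_alt string1 string2 original_char substituted_char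
instance (string1 : String) (string2 : String) (original_char : String) (substituted_char : String) (out : Bool) : Decidable (Spec_verify_substitution string1 string2 original_char substituted_char out) := by unfold Spec_verify_substitution; infer_instance

-- ===== CLAIM (what is proved, stated in full; the proofs are below) =====
def Claim_equal_verify_substitution : Prop := ∀ (string1 : String) (string2 : String) (original_char : String) (substituted_char : String), Dom_verify_substitution string1 string2 original_char substituted_char → Spec_verify_substitution string1 string2 original_char substituted_char (verify_substitution string1 string2 original_char substituted_char)

-- ===== LEMMAS AND PROOFS =====

-- Lower bound on the flatMap length when every block is nonempty.
theorem flatMap_len_ge {f : Char → List Char} (h : ∀ c, 1 ≤ (f c).length)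
    (l : List Char) : l.length ≤ (l.flatMap f).length := by
  induction l with
  | nil => simp
  | cons c cs ih =>
    simp only [List.flatMap_cons, List.length_append, List.length_cons]
    have := h c
    omega

-- Upper bound on the flatMap length when every block has length ≤ 1.
theorem flatMap_len_le {f : Char → List Char} (h : ∀ c, (f c).length ≤ 1)
    (l : List Char) : (l.flatMap f).length ≤ l.length := by
  induction l with
  | nil => simp
  | cons c cs ih =>
    simp only [List.flatMap_cons, List.length_append, List.length_cons]
    have := h c
    omega

-- Core equivalence of the two loop bodies on equal-length suffixes.
theorem loop_eq_flatMap (oc sc : String) (l1 : List Char) :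
    ∀ l2 : List Char, l1.length = l2.length →
      verifyLoopA l1 l2 oc sc =
        ((l1.flatMap (fun c => if String.ofList [c] = oc then sc.toList else [c])) == l2) := by
  induction l1 with
  | nil =>
    intro l2 hlen
    cases l2 with
    | nil => simp [verifyLoopA]
    | cons d ds => simp at hlen
  | cons c cs ih =>
    intro l2 hlen
    cases l2 with
    | nil => simp at hlen
    | cons d ds =>
      have hlen' : cs.length = ds.length := by
        simpa using hlen
      by_cases hc : String.ofList [c] = oc
      · by_cases hd : String.ofList [d] = sc
        · -- matched position substituted correctly: sc.toList = [d]
          have hsc : sc.toList = [d] := by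
            rw [← hd]; simp
          simp [verifyLoopA, hc, hd, hsc, ih ds hlen']
        · -- matched position, mismatch: show the flatMap cannot equal d :: ds
          have hA : verifyLoopA (c :: cs) (d :: ds) oc sc = false := by
            simp [verifyLoopA, hc, hd]
          rw [hA]
          set f : Char → List Char := fun c => if String.ofList [c] = oc then sc.toList else [c] with hf
          have hne : ¬ (sc.toList ++ cs.flatMap f = d :: ds) := by
            intro heq'
            match hsc : sc.toList with
            | [] =>
              -- blocks all have length ≤ 1, so the flatMap is too short
              rw [hsc] at heq'
              simp only [List.nil_append] at heq'
              have hle : (cs.flatMap f).length ≤ cs.length := by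
                apply flatMap_len_le
                intro x
                by_cases hx : String.ofList [x] = oc <;> simp [hf, hx, hsc]
              rw [heq'] at hle
              simp [hlen'] at hle
            | [x] =>
              -- one-character substitution differing from d: heads differ
              rw [hsc] at heq'
              have hxd : x = d := by
                have := congrArg (fun l => l.headD ' ') heq'
                simpa using this
              exact hd (String.toList_inj.mp (by simp [hsc, hxd]))
            | x :: y :: rest =>
              -- blocks all have length ≥ 1 and this one ≥ 2: the flatMap is too long
              have hlong : 2 ≤ sc.toList.length := by simp [hsc]
              have hlenfm : sc.toList.length + (cs.flatMap f).length = ds.length + 1 := by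
                have := congrArg List.length heq'
                simpa using this
              have hcsge : cs.length ≤ (cs.flatMap f).length := by
                apply flatMap_len_ge
                intro z
                by_cases hz : String.ofList [z] = oc <;> simp [hf, hz, hsc]
              omega
          have hfc : f c = sc.toList := by simp [hf, hc]
          simp [hfc, hne]
      · -- unmatched position: both reduce to a head comparison plus the tail
        by_cases hcd : c = d
        · subst hcd
          simp [verifyLoopA, hc, ih ds hlen']
        · simp [verifyLoopA, hc, hcd]

-- ===== VERDICT (by name: the statement is the Claim_ definition above) =====
theorem verify_substitution_spec : Claim_equal_verify_substitution := by
  intro s1 s2 oc sc _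
  unfold Spec_verify_substitution verify_substitution verify_substitution_alt
  by_cases hlen : PySem.Str.len s1 = PySem.Str.len s2
  · have hl : s1.toList.length = s2.toList.length := by
      simp only [PySem.Str.len_eq] at hlen
      exact_mod_cast hlen
    simp [loop_eq_flatMap oc sc s1.toList s2.toList hl]
  · have hne : s1.length ≠ s2.length := fun h => hlen (by simp [h])
    simp [hne]
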